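-- pv_equiv track=rewrite | github.com/Larryrun80/iqg_stats_new | stats/scripts/hsq_new_customer.py | get_jx_statics
-- ===== SOURCE A (Python) =====
-- def get_distinct_users(orders):
--     ''' receive an order table (result of select sql) and return distinct user cnt
--
--         arguments:
--         orders, a result from sql select, with user_id the first col
--
--         return:
--         user count
--     '''
--     if orders:
--         users = [u[0] for u in orders]
--         return set(users)
--     else:
--         return set()
--
-- def get_jx_statics(orders, dealed_users):
--     ''' get all normal jingxuan orders
--
--         arguments:
--         orders, format with ([column_names], (selected data))
--
--         return:
--         ([orders of normal skus], [orders of promotion skus])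
--     '''
--     if len(orders) != 2:
--         raise RuntimeError('Invalid order info passed')
--
--     return_data = {}
--     cols_seq = {
--                     'user_id': 0,
--                     'source': 0,
--                     'profit': 0,
--     }
--
--     for i, cn in enumerate(orders[0], 0):
--         for col in cols_seq:
--             if col == cn:
--                 cols_seq[col] = i
--
--     promotion_orders = [row for row in orders[1]
--                         if (row[cols_seq['source']] == 2 and
--                             row[cols_seq['profit']] < 0 and
--                             row[cols_seq['user_id']] not in dealed_users)]
--     p_users = get_distinct_users(promotion_orders)
--     dealed_users = dealed_users | p_users
--
--     normal_orders = [row for row in orders[1]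
--                      if (row[cols_seq['source']] == 2 and
--                          row[cols_seq['profit']] >= 0 and
--                          row[cols_seq['user_id']] not in dealed_users)]
--     n_users = get_distinct_users(normal_orders)
--     dealed_users = dealed_users | n_users
--
--     return_data['jx_normal'] = len(n_users)
--     return_data['jx_promotion'] = len(p_users)
--     return_data['total'] = len(n_users | p_users)
--     return (return_data, dealed_users)
-- ===== SOURCE B (Python) =====
-- def get_jx_statics(orders, dealed_users):
--     ''' single pass over the data rows collecting promotion users and
--         normal-order candidate users, then one set subtraction '''
--     cols, rows = orders
--
--     iu = isrc = ipf = 0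
--     for i, cn in enumerate(cols):
--         if cn == 'user_id':
--             iu = i
--         elif cn == 'source':
--             isrc = i
--         elif cn == 'profit':
--             ipf = i
--
--     p_users = set()
--     candidates = set()
--     for row in rows:
--         if row[isrc] == 2 and row[iu] not in dealed_users:
--             (p_users if row[ipf] < 0 else candidates).add(row[iu])
--
--     n_users = candidates - p_users
--     return ({'jx_normal': len(n_users),
--              'jx_promotion': len(p_users),
--              'total': len(n_users | p_users)},
--             dealed_users | p_users | n_users)
-- ===== Notes on version B (the rewrite author's own statement) =====
-- stated objective: alternative
-- what changed: Replaces A's two full filtering passes plus the distinct-user helper by a single pass over the rows that collects promotion users and normal-order candidate users, followed by one set subtraction, with the column indices from one elif scan instead of the nested dict loop; …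
import Mathlib
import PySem

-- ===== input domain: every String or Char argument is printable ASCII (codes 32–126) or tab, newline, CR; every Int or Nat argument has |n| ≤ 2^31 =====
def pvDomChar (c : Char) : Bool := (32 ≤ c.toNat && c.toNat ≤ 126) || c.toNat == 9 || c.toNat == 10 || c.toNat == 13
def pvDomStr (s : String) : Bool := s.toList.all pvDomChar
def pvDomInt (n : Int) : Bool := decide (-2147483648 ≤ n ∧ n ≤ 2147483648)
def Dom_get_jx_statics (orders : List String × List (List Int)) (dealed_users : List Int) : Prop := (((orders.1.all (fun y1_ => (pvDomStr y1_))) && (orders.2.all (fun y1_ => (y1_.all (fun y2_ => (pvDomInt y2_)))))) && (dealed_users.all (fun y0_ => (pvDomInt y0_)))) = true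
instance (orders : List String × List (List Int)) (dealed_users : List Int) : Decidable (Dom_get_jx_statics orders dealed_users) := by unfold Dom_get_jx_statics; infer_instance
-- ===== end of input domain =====

-- B makes one pass over the rows (promotion users + normal candidates, then a set
-- subtraction) instead of A's two filtering passes; return-value equivalence only
-- (neither version mutates its arguments observably).

-- ===== PORT A =====
-- row[i] on an Int index; exact where the index is in range (Pre_ guarantees that)
def pvGet (row : List Int) (i : Int) : Int := (PySem.List.pyGet? row i).getD 0

-- helper get_distinct_users: set of u[0]
def pvDistinctUsers (os : List (List Int)) : List Int :=
  if os.isEmpty then PySem.Set.empty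
  else PySem.Set.ofList (os.map (fun u => pvGet u 0))

-- one step of A's `for i, cn in enumerate(orders[0], 0): for col in cols_seq: …`
def pvColsStep (d : PySem.Dict String Int) (p : Int × String) : PySem.Dict String Int :=
  d.keys.foldl (fun d' col => if col == p.2 then d'.insert col p.1 else d') d

def get_jx_statics (orders : List String × List (List Int)) (dealed_users : List Int) : (List (String × Int)) × List Int :=
  -- len(orders) == 2 always holds for a pair, so the RuntimeError branch is unreachable
  let cols_seq := (PySem.List.enumerate orders.1 0).foldl pvColsStep
      (PySem.Dict.ofList [("user_id", 0), ("source", 0), ("profit", 0)])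
  let iu := cols_seq.getD "user_id" 0
  let isrc := cols_seq.getD "source" 0
  let ipf := cols_seq.getD "profit" 0
  let promotion_orders := orders.2.filter (fun row =>
      pvGet row isrc == 2 && decide (pvGet row ipf < 0) &&
      !(PySem.Set.contains dealed_users (pvGet row iu)))
  let p_users := pvDistinctUsers promotion_orders
  let dealed1 := PySem.Set.union dealed_users p_users
  let normal_orders := orders.2.filter (fun row =>
      pvGet row isrc == 2 && decide (0 ≤ pvGet row ipf) &&
      !(PySem.Set.contains dealed1 (pvGet row iu)))
  let n_users := pvDistinctUsers normal_orders
  let dealed2 := PySem.Set.union dealed1 n_users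
  let rd := ((PySem.Dict.empty.insert "jx_normal" (PySem.Set.len n_users)).insert
      "jx_promotion" (PySem.Set.len p_users)).insert
      "total" (PySem.Set.len (PySem.Set.union n_users p_users))
  (rd.items, dealed2)

-- ===== PORT B =====
-- one step of B's column scan `if cn == 'user_id': … elif …`; state = (iu, isrc, ipf)
def pvColsB (t : Int × Int × Int) (p : Int × String) : Int × Int × Int :=
  if p.2 == "user_id" then (p.1, t.2.1, t.2.2)
  else if p.2 == "source" then (t.1, p.1, t.2.2)
  else if p.2 == "profit" then (t.1, t.2.1, p.1)
  else t

-- one step of B's single row loop; state = (p_users, candidates)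
def pvRowStep (dealed : List Int) (iu isrc ipf : Int)
    (st : List Int × List Int) (row : List Int) : List Int × List Int :=
  if pvGet row isrc == 2 && !(PySem.Set.contains dealed (pvGet row iu)) then
    if decide (pvGet row ipf < 0) then (PySem.Set.add st.1 (pvGet row iu), st.2)
    else (st.1, PySem.Set.add st.2 (pvGet row iu))
  else st

def get_jx_statics_alt (orders : List String × List (List Int)) (dealed_users : List Int) : (List (String × Int)) × List Int :=
  let t := (PySem.List.enumerate orders.1 0).foldl pvColsB (0, 0, 0)
  let st := orders.2.foldl (pvRowStep dealed_users t.1 t.2.1 t.2.2)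
      (PySem.Set.empty, PySem.Set.empty)
  let p_users := st.1
  let n_users := PySem.Set.diff st.2 p_users
  ([("jx_normal", PySem.Set.len n_users),
    ("jx_promotion", PySem.Set.len p_users),
    ("total", PySem.Set.len (PySem.Set.union n_users p_users))],
   PySem.Set.union (PySem.Set.union dealed_users p_users) n_users)

-- ===== PRECONDITION & SPEC =====
-- index of the last occurrence of name in cols, default 0 (what both programs locate)
def pvIdx (cols : List String) (name : String) : Int :=
  (PySem.List.enumerate cols 0).foldl (fun k p => if p.2 == name then p.1 else k) 0

-- Pre_ excludes (a) inputs where a data row is too short for one of the three column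
-- indices (Python raises IndexError there; the in-range demand is slightly stricter than
-- A's lazy short-circuit evaluation, see cite), and (b) inputs whose header places the
-- user_id column anywhere but column 0, violating the result-set shape the module
-- documents ('with user_id the first col'); there A reads users from column 0 while its
-- filters read the located user_id column, B reads the located column throughout, and
-- neither behaviour is specified for such headers (see cite).
def Pre_get_jx_statics (orders : List String × List (List Int)) (dealed_users : List Int) : Prop :=
  pvIdx orders.1 "user_id" = 0 ∧
  ∀ row ∈ orders.2,
    pvIdx orders.1 "user_id" < (row.length : Int) ∧
    pvIdx orders.1 "source" < (row.length : Int) ∧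
    pvIdx orders.1 "profit" < (row.length : Int)
instance (orders : List String × List (List Int)) (dealed_users : List Int) : Decidable (Pre_get_jx_statics orders dealed_users) := by unfold Pre_get_jx_statics; infer_instance

def pvWitness_get_jx_statics : (List String × List (List Int)) × List Int :=
  ((["user_id", "source", "profit"], [[1, 2, -5], [2, 2, 3], [1, 1, 4]]), [7])

def Spec_get_jx_statics (orders : List String × List (List Int)) (dealed_users : List Int) (out : (List (String × Int)) × List Int) : Prop := out = get_jx_statics_alt orders dealed_users
instance (orders : List String × List (List Int)) (dealed_users : List Int) (out : (List (String × Int)) × List Int) : Decidable (Spec_get_jx_statics orders dealed_users out) := by unfold Spec_get_jx_statics; infer_instance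

-- ===== CLAIM (what is proved, stated in full; the proofs are below) =====
def Claim_equal_get_jx_statics : Prop := ∀ (orders : List String × List (List Int)) (dealed_users : List Int), Dom_get_jx_statics orders dealed_users → Pre_get_jx_statics orders dealed_users → Spec_get_jx_statics orders dealed_users (get_jx_statics orders dealed_users)

-- ===== LEMMAS AND PROOFS =====

-- one step of A's column loop on the 3-key dict
theorem colsStep_mk (cn : String) (i a b c : Int) :
    pvColsStep (PySem.Dict.mk [("user_id", a), ("source", b), ("profit", c)]) (i, cn)
    = PySem.Dict.mk [("user_id", if cn == "user_id" then i else a),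
                     ("source", if cn == "source" then i else b),
                     ("profit", if cn == "profit" then i else c)] := by
  simp only [pvColsStep, PySem.Dict.keys_mk, List.map, List.foldl]
  by_cases h1 : "user_id" = cn <;> by_cases h2 : "source" = cn <;> by_cases h3 : "profit" = cn
  · rw [← h2] at h1; simp at h1
  · rw [← h2] at h1; simp at h1
  · rw [← h3] at h1; simp at h1
  · subst h1; apply PySem.Dict.ext; simp [PySem.Dict.items_insert]
  · rw [← h3] at h2; simp at h2
  · subst h2; apply PySem.Dict.ext; simp [PySem.Dict.items_insert]
  · subst h3; apply PySem.Dict.ext; simp [PySem.Dict.items_insert]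
  · simp [h1, h2, h3, show ¬ (cn = "user_id") from fun h => h1 h.symm,
          show ¬ (cn = "source") from fun h => h2 h.symm,
          show ¬ (cn = "profit") from fun h => h3 h.symm]

-- A's whole column loop = three independent last-occurrence folds
theorem colsLoop (L : List (Int × String)) (a b c : Int) :
    L.foldl pvColsStep (PySem.Dict.mk [("user_id", a), ("source", b), ("profit", c)])
    = PySem.Dict.mk
        [("user_id", L.foldl (fun k p => if p.2 == "user_id" then p.1 else k) a),
         ("source", L.foldl (fun k p => if p.2 == "source" then p.1 else k) b),
         ("profit", L.foldl (fun k p => if p.2 == "profit" then p.1 else k) c)] := by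
  induction L generalizing a b c with
  | nil => rfl
  | cons p L ih =>
      rw [List.foldl_cons, show p = (p.1, p.2) from rfl, colsStep_mk, ih]
      rfl

theorem getD_mk3 (x y z : Int) (k : String) :
    (PySem.Dict.mk [("user_id", x), ("source", y), ("profit", z)] : PySem.Dict String Int).getD k 0
    = if k = "user_id" then x else if k = "source" then y else if k = "profit" then z else 0 := by
  rw [PySem.Dict.getD_eq_get?_getD, PySem.Dict.get?_mk_cons, PySem.Dict.get?_mk_cons,
      PySem.Dict.get?_mk_cons]
  by_cases h1 : k = "user_id"
  · subst h1; simp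
  · by_cases h2 : k = "source"
    · subst h2; simp
    · by_cases h3 : k = "profit"
      · subst h3; simp
      · have g1 : (("user_id" : String) == k) = false := by simp; exact fun h => h1 h.symm
        have g2 : (("source" : String) == k) = false := by simp; exact fun h => h2 h.symm
        have g3 : (("profit" : String) == k) = false := by simp; exact fun h => h3 h.symm
        simp [g1, g2, g3, h1, h2, h3,
              show (PySem.Dict.mk ([] : List (String × Int))) = PySem.Dict.empty from rfl,
              PySem.Dict.get?_empty]

-- B's column loop = the same three independent last-occurrence folds
theorem colsLoopB (L : List (Int × String)) (a b c : Int) :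
    L.foldl pvColsB (a, b, c)
    = (L.foldl (fun k p => if p.2 == "user_id" then p.1 else k) a,
       L.foldl (fun k p => if p.2 == "source" then p.1 else k) b,
       L.foldl (fun k p => if p.2 == "profit" then p.1 else k) c) := by
  induction L generalizing a b c with
  | nil => rfl
  | cons p L ih =>
      rw [List.foldl_cons, List.foldl_cons, List.foldl_cons, List.foldl_cons, pvColsB]
      by_cases h1 : p.2 = "user_id" <;> by_cases h2 : p.2 = "source" <;>
        by_cases h3 : p.2 = "profit" <;> simp_all

-- B's pair-state row loop splits into the p_users fold and the candidates fold
theorem rowLoop (d : List Int) (iu isrc ipf : Int) (rows : List (List Int))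
    (s c : List Int) :
    rows.foldl (pvRowStep d iu isrc ipf) (s, c)
    = (rows.foldl (fun s r =>
          if (pvGet r isrc == 2 && !(PySem.Set.contains d (pvGet r iu))) && decide (pvGet r ipf < 0)
          then PySem.Set.add s (pvGet r iu) else s) s,
       rows.foldl (fun c r =>
          if (pvGet r isrc == 2 && !(PySem.Set.contains d (pvGet r iu))) && !decide (pvGet r ipf < 0)
          then PySem.Set.add c (pvGet r iu) else c) c) := by
  induction rows generalizing s c with
  | nil => rfl
  | cons r rows ih =>
      rw [List.foldl_cons, List.foldl_cons, List.foldl_cons, pvRowStep]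
      by_cases h1 : (pvGet r isrc == 2 && !(PySem.Set.contains d (pvGet r iu))) = true <;>
        by_cases h2 : (decide (pvGet r ipf < 0)) = true <;>
          simp only [h1, h2, Bool.true_and, Bool.false_and, Bool.and_false, Bool.and_true,
            Bool.not_true, Bool.not_false, if_true, if_false, Bool.false_eq_true,
            if_pos, if_neg] <;> simp_all [ih]

-- get_distinct_users never needs its empty-list branch separately
theorem distinct_eq_ofList (os : List (List Int)) :
    pvDistinctUsers os = PySem.Set.ofList (os.map (fun u => pvGet u 0)) := by
  cases os <;> rfl

theorem contains_union (s t : List Int) (x : Int) :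
    (PySem.Set.union s t).contains x = (PySem.Set.contains s x || PySem.Set.contains t x) := by
  rw [Bool.eq_iff_iff]; simp [PySem.Set.mem_union]

theorem not_lt_decide (x : Int) : (!decide (x < 0)) = decide (0 ≤ x) := by
  by_cases h : x < 0 <;> simp [h]; omega

theorem items_rd (v1 v2 v3 : Int) :
    (((PySem.Dict.empty.insert "jx_normal" v1).insert "jx_promotion" v2).insert "total" v3).items
    = [("jx_normal", v1), ("jx_promotion", v2), ("total", v3)] := by
  simp [PySem.Dict.items_insert, PySem.Dict.contains_insert, PySem.Dict.empty]

-- filtering commutes with Set.add / Set.ofList (the set-subtraction normal form)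
theorem add_filter (g : Int → Bool) (s : List Int) (x : Int) :
    (PySem.Set.add s x).filter g
    = if g x then PySem.Set.add (s.filter g) x else s.filter g := by
  by_cases hm : x ∈ s <;> by_cases hg : g x = true <;>
    simp [PySem.Set.add, hm, hg, List.filter_append, List.mem_filter]

theorem foldl_add_filter (g : Int → Bool) (L s : List Int) :
    (L.foldl PySem.Set.add s).filter g = (L.filter g).foldl PySem.Set.add (s.filter g) := by
  induction L generalizing s with
  | nil => rfl
  | cons x L ih =>
      rw [List.foldl_cons, ih, List.filter_cons, add_filter]
      by_cases hg : g x = true <;> simp [hg]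

theorem ofList_filter (g : Int → Bool) (L : List Int) :
    (PySem.Set.ofList L).filter g = PySem.Set.ofList (L.filter g) := by
  rw [PySem.Set.ofList_eq_foldl, PySem.Set.ofList_eq_foldl, foldl_add_filter]; rfl

-- a conditional-add fold is ofList of map of filter
theorem foldl_condAdd (q : List Int → Bool) (f : List Int → Int) (rows : List (List Int)) (s : List Int) :
    rows.foldl (fun s r => if q r then PySem.Set.add s (f r) else s) s
    = ((rows.filter q).map f).foldl PySem.Set.add s := by
  induction rows generalizing s with
  | nil => rfl
  | cons r rows ih =>
      rw [List.foldl_cons, List.filter_cons]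
      by_cases hq : q r = true <;> simp [hq, ih]

-- ===== VERDICT (by name: the statement is the Claim_ definition above) =====
theorem get_jx_statics_spec : Claim_equal_get_jx_statics := by
  intro orders dealed _ hpre
  unfold Spec_get_jx_statics
  -- Pre_ pins the user_id column to 0, so both programs read the same user column
  have H : ∀ r ∈ orders.2, pvGet r (pvIdx orders.1 "source") = 2 →
      PySem.Set.contains dealed (pvGet r (pvIdx orders.1 "user_id")) = false →
      pvGet r 0 = pvGet r (pvIdx orders.1 "user_id") := by
    intro r _ _ _
    rw [hpre.1]
  unfold get_jx_statics get_jx_statics_alt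
  dsimp only
  have hof : PySem.Dict.ofList [("user_id", (0:Int)), ("source", 0), ("profit", 0)]
      = PySem.Dict.mk [("user_id", 0), ("source", 0), ("profit", 0)] := by decide
  rw [hof, colsLoop, colsLoopB]
  rw [getD_mk3, getD_mk3, getD_mk3]
  simp only [String.reduceEq, reduceIte]
  rw [rowLoop]
  set iu := pvIdx orders.1 "user_id" with hiu
  set isrc := pvIdx orders.1 "source" with hisrc
  set ipf := pvIdx orders.1 "profit" with hipf
  rw [show (PySem.List.enumerate orders.1 0).foldl (fun k p => if p.2 == "user_id" then p.1 else k) 0 = iu from rfl,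
      show (PySem.List.enumerate orders.1 0).foldl (fun k p => if p.2 == "source" then p.1 else k) 0 = isrc from rfl,
      show (PySem.List.enumerate orders.1 0).foldl (fun k p => if p.2 == "profit" then p.1 else k) 0 = ipf from rfl]
  -- p_users agree
  have hp : pvDistinctUsers (orders.2.filter (fun row =>
        pvGet row isrc == 2 && decide (pvGet row ipf < 0) &&
        !(PySem.Set.contains dealed (pvGet row iu))))
      = orders.2.foldl (fun s r =>
          if (pvGet r isrc == 2 && !(PySem.Set.contains dealed (pvGet r iu))) && decide (pvGet r ipf < 0)
          then PySem.Set.add s (pvGet r iu) else s) PySem.Set.empty := by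
    rw [distinct_eq_ofList, PySem.Set.ofList_eq_foldl, List.foldl_map, List.foldl_filter]
    apply PySem.List.foldl_congr_mem
    intro s r hr
    have hcond : (pvGet r isrc == 2 && decide (pvGet r ipf < 0) && !(PySem.Set.contains dealed (pvGet r iu)))
        = ((pvGet r isrc == 2 && !(PySem.Set.contains dealed (pvGet r iu))) && decide (pvGet r ipf < 0)) := by
      cases h1 : (pvGet r isrc == 2) <;> cases h2 : decide (pvGet r ipf < 0) <;>
        cases h3 : PySem.Set.contains dealed (pvGet r iu) <;> rfl
    rw [hcond]
    by_cases hb : ((pvGet r isrc == 2 && !(PySem.Set.contains dealed (pvGet r iu))) && decide (pvGet r ipf < 0)) = true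
    · rw [if_pos hb, if_pos hb]
      have hb' := hb
      simp only [Bool.and_eq_true, beq_iff_eq, Bool.not_eq_true'] at hb'
      rw [H r hr hb'.1.1 hb'.1.2]
    · rw [if_neg hb, if_neg hb]
  rw [hp]
  set pU := orders.2.foldl (fun s r =>
      if (pvGet r isrc == 2 && !(PySem.Set.contains dealed (pvGet r iu))) && decide (pvGet r ipf < 0)
      then PySem.Set.add s (pvGet r iu) else s) PySem.Set.empty with hpU
  -- n_users agree: A's second pass = B's candidates minus pU
  have hn : pvDistinctUsers (orders.2.filter (fun row =>
        pvGet row isrc == 2 && decide (0 ≤ pvGet row ipf) &&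
        !(PySem.Set.contains (PySem.Set.union dealed pU) (pvGet row iu))))
      = PySem.Set.diff
          (orders.2.foldl (fun c r =>
            if (pvGet r isrc == 2 && !(PySem.Set.contains dealed (pvGet r iu))) && !decide (pvGet r ipf < 0)
            then PySem.Set.add c (pvGet r iu) else c) PySem.Set.empty) pU := by
    rw [distinct_eq_ofList]
    -- rewrite A's filtered map with user-column values (via H), then split off the pU test
    have hmap : (orders.2.filter (fun row =>
          pvGet row isrc == 2 && decide (0 ≤ pvGet row ipf) &&
          !(PySem.Set.contains (PySem.Set.union dealed pU) (pvGet row iu)))).map (fun u => pvGet u 0)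
        = (orders.2.filter (fun row =>
          ((pvGet row isrc == 2 && !(PySem.Set.contains dealed (pvGet row iu))) && !decide (pvGet row ipf < 0))
          && !(PySem.Set.contains pU (pvGet row iu)))).map (fun u => pvGet u iu) := by
      have hfe : orders.2.filter (fun row =>
            pvGet row isrc == 2 && decide (0 ≤ pvGet row ipf) &&
            !(PySem.Set.contains (PySem.Set.union dealed pU) (pvGet row iu)))
          = orders.2.filter (fun row =>
            ((pvGet row isrc == 2 && !(PySem.Set.contains dealed (pvGet row iu))) && !decide (pvGet row ipf < 0))
            && !(PySem.Set.contains pU (pvGet row iu))) := by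
        apply List.filter_congr
        intro r _
        rw [show PySem.Set.contains (PySem.Set.union dealed pU) (pvGet r iu)
              = (PySem.Set.union dealed pU).contains (pvGet r iu) from rfl, contains_union]
        by_cases h1 : (pvGet r isrc == 2) = true <;>
          by_cases h2 : (decide (pvGet r ipf < 0)) = true <;>
            by_cases h3 : (PySem.Set.contains dealed (pvGet r iu)) = true <;>
              by_cases h4 : (PySem.Set.contains pU (pvGet r iu)) = true <;>
                simp [h1, h2, h3, h4, ← not_lt_decide]
      rw [← hfe]
      apply List.map_congr_left
      intro r hr
      have hr' := List.mem_filter.mp hr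
      have hcond := hr'.2
      simp only [Bool.and_eq_true, beq_iff_eq, Bool.not_eq_eq_eq_not, Bool.not_true] at hcond
      obtain ⟨⟨hsrc, _⟩, hun⟩ := hcond
      have hdl : PySem.Set.contains dealed (pvGet r iu) = false := by
        have := contains_union dealed pU (pvGet r iu)
        rw [show PySem.Set.contains (PySem.Set.union dealed pU) (pvGet r iu)
              = (PySem.Set.union dealed pU).contains (pvGet r iu) from rfl] at hun
        rw [this] at hun
        cases h : PySem.Set.contains dealed (pvGet r iu) <;> simp_all
      exact H r hr'.1 hsrc hdl
    rw [hmap]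
    rw [show ∀ (l : List Int), PySem.Set.diff l pU = l.filter (fun x => !(PySem.Set.contains pU x)) from fun l => rfl]
    rw [foldl_condAdd (fun r => (pvGet r isrc == 2 && !(PySem.Set.contains dealed (pvGet r iu))) && !decide (pvGet r ipf < 0)) (fun r => pvGet r iu) orders.2 PySem.Set.empty]
    rw [show (PySem.Set.empty : List Int) = ([] : List Int) from rfl]
    rw [show ((((orders.2.filter (fun r => (pvGet r isrc == 2 && !(PySem.Set.contains dealed (pvGet r iu))) && !decide (pvGet r ipf < 0))).map (fun r => pvGet r iu)).foldl PySem.Set.add [] : List Int))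
          = PySem.Set.ofList (((orders.2.filter (fun r => (pvGet r isrc == 2 && !(PySem.Set.contains dealed (pvGet r iu))) && !decide (pvGet r ipf < 0))).map (fun r => pvGet r iu))) from (PySem.Set.ofList_eq_foldl _).symm]
    rw [ofList_filter]
    congr 1
    rw [List.filter_map, List.filter_filter]
    congr 1
    apply List.filter_congr
    intro a _
    simp only [Function.comp]
    exact Bool.and_comm _ _
  rw [hn]
  rw [items_rd]
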